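-- pv_equiv track=rewrite | github.com/Ahek/pdf_to_speech | pdftotext.py | paste_oneword
-- ===== SOURCE A (Python) =====
-- def paste_oneword(chunks):
--     paste_oneword_chunks = ['']
--     for chunk in chunks:
--         if ' ' not in chunk:
--             paste_oneword_chunks[-1] = paste_oneword_chunks[-1] + ' ' + chunk
--         else:
--             paste_oneword_chunks.append(chunk)
--     if paste_oneword_chunks[0] == '':
--         paste_oneword_chunks = paste_oneword_chunks[1:]
--     return paste_oneword_chunks
-- ===== SOURCE B (Python) =====
-- def paste_oneword(chunks):
--     # span-based: find boundary chunks (containing a space) and join each with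
--     # the run of single-word chunks that follows it; a leading run of single
--     # words (each prefixed by ' ') forms its own first group.
--     def glue(words):
--         return ''.join(' ' + w for w in words)
--     n = len(chunks)
--     k = 0
--     while k < n and ' ' not in chunks[k]:
--         k += 1
--     out = [glue(chunks[:k])] if k > 0 else []
--     i = k
--     while i < n:
--         j = i + 1
--         while j < n and ' ' not in chunks[j]:
--             j += 1
--         out.append(chunks[i] + glue(chunks[i + 1:j]))
--         i = j
--     return out
-- ===== Notes on version B (the rewrite author's own statement) =====
-- stated objective: faster
-- what changed: A folds over the chunks repeatedly rebuilding the accumulator's last string with + (quadratic on long runs of single-word chunks) and trims the ''-seed afterwards; B instead scans span-by-span, emitting the leading run of single-word chunks as its own group and then one group per space-containing chunk, each built with a single ''.join over its run.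
import Mathlib
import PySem

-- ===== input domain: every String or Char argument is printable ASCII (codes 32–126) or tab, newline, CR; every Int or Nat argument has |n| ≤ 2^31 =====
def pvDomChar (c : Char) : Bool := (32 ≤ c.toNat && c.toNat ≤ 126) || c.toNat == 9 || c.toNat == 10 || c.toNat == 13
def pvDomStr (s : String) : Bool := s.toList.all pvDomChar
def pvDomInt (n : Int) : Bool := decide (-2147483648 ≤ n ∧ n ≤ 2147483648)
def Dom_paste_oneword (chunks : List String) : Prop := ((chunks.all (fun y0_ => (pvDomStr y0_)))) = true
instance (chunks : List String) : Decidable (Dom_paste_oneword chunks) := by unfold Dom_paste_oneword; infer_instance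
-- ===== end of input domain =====

-- B replaces A's mutate-the-last-element accumulator loop (repeated string
-- concatenation) by a span-based decomposition building each group with one
-- ''.join; objective: faster (measured) on long runs of single-word chunks.

-- Python string concatenation a + b (shared helper of both ports)
def pvCat (a b : String) : String := String.ofList (a.toList ++ b.toList)

-- ===== PORT A =====
def paste_oneword (chunks : List String) : List String :=
  let res := chunks.foldl (fun acc chunk =>
    if PySem.Str.isIn " " chunk = false then
      PySem.List.pySetD acc (-1)
        (pvCat (pvCat (PySem.List.pyGetD acc (-1) "") " ") chunk)
    else acc ++ [chunk]) [""]
  if PySem.List.pyGetD res 0 "" = "" then PySem.List.slice res (some 1) none else res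

-- ===== PORT B =====
-- ' ' not in c
def pvNoSpace (c : String) : Bool := !(PySem.Str.isIn " " c)

-- ''.join(' ' + w for w in ws)
def pvGlue (ws : List String) : String := PySem.Str.join "" (ws.map (fun w => pvCat " " w))

-- Source B's outer while loop: one group per boundary chunk plus its following run
-- of single-word chunks (the inner scan j is takeWhile/dropWhile)
def pvGroups : List String → List String
  | [] => []
  | h :: t => pvCat h (pvGlue (t.takeWhile pvNoSpace)) :: pvGroups (t.dropWhile pvNoSpace)
  termination_by l => l.length
  decreasing_by simpa using Nat.lt_succ_of_le (List.length_dropWhile_le pvNoSpace t)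

def paste_oneword_alt (chunks : List String) : List String :=
  let lead := chunks.takeWhile pvNoSpace
  let rest := chunks.dropWhile pvNoSpace
  if lead.isEmpty then pvGroups rest else pvGlue lead :: pvGroups rest

-- ===== PRECONDITION & SPEC =====
def Spec_paste_oneword (chunks : List String) (out : List String) : Prop := out = paste_oneword_alt chunks
instance (chunks : List String) (out : List String) : Decidable (Spec_paste_oneword chunks out) := by unfold Spec_paste_oneword; infer_instance

-- ===== CLAIM (what is proved, stated in full; the proofs are below) =====
def Claim_equal_paste_oneword : Prop := ∀ (chunks : List String), Dom_paste_oneword chunks → Spec_paste_oneword chunks (paste_oneword chunks)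

-- ===== LEMMAS AND PROOFS =====

theorem pvCat_toList (a b : String) : (pvCat a b).toList = a.toList ++ b.toList := by
  simp [pvCat]

theorem pv_str_ext {a b : String} (h : a.toList = b.toList) : a = b := by
  have := congrArg String.ofList h
  simpa using this

theorem pvCat_empty_right (a : String) : pvCat a "" = a := by
  apply pv_str_ext; simp [pvCat_toList]

theorem pvCat_empty_left (b : String) : pvCat "" b = b := by
  apply pv_str_ext; simp [pvCat_toList]

theorem pvCat_assoc (a b c : String) : pvCat (pvCat a b) c = pvCat a (pvCat b c) := by
  apply pv_str_ext; simp [pvCat_toList]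

theorem pvGlue_nil : pvGlue [] = "" := by
  apply pv_str_ext; simp [pvGlue, PySem.Chars.join_nil]

theorem pvGroups_nil : pvGroups [] = [] := by
  unfold pvGroups; rfl

theorem pvGroups_cons (h : String) (t : List String) :
    pvGroups (h :: t) = pvCat h (pvGlue (t.takeWhile pvNoSpace)) :: pvGroups (t.dropWhile pvNoSpace) := by
  rw [pvGroups]

theorem pvGlue_cons (c : String) (l : List String) :
    pvGlue (c :: l) = pvCat (pvCat " " c) (pvGlue l) := by
  apply pv_str_ext
  rw [pvCat_toList]
  unfold pvGlue
  cases l with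
  | nil => simp [PySem.Chars.join_singleton, PySem.Chars.join_nil]
  | cons y t => simp [PySem.Chars.join_cons_cons]

theorem pvGlue_cons_ne_empty (c : String) (l : List String) : pvGlue (c :: l) ≠ "" := by
  intro h
  have := congrArg String.toList h
  rw [pvGlue_cons, pvCat_toList, pvCat_toList] at this
  simp at this

-- A's last-element assignment on a nonempty accumulator
theorem pvSetLast (xs : List String) (x v : String) :
    PySem.List.pySetD (xs ++ [x]) (-1) v = xs ++ [v] := by
  unfold PySem.List.pySetD PySem.List.pySet? PySem.List.pyIdx?
  have h1 : ¬ ((0:Int) ≤ -1) := by decide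
  have h2 : -(((xs ++ [x]).length : Nat) : Int) ≤ -1 := by simp
  rw [if_neg h1, if_pos h2]
  simp [List.set_append]

-- invariant of A's loop: the state is acc ++ [last]; running the loop glues the
-- coming run of single-word chunks onto last and then emits pvGroups of the rest
theorem pvLoopA (cs : List String) (acc : List String) (last : String) :
    cs.foldl (fun acc chunk =>
      if PySem.Str.isIn " " chunk = false then
        PySem.List.pySetD acc (-1)
          (pvCat (pvCat (PySem.List.pyGetD acc (-1) "") " ") chunk)
      else acc ++ [chunk]) (acc ++ [last])
    = acc ++ pvCat last (pvGlue (cs.takeWhile pvNoSpace)) :: pvGroups (cs.dropWhile pvNoSpace) := by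
  induction cs generalizing acc last with
  | nil => simp [pvGlue_nil, pvCat_empty_right, pvGroups_nil]
  | cons c cs ih =>
    cases hb : PySem.Str.isIn " " c with
    | false =>
      rw [List.foldl_cons, if_pos hb, PySem.List.pyGetD_neg_one_append_singleton, pvSetLast,
        ih acc (pvCat (pvCat last " ") c)]
      have hns : pvNoSpace c = true := by unfold pvNoSpace; rw [hb]; rfl
      have htw : (c :: cs).takeWhile pvNoSpace = c :: cs.takeWhile pvNoSpace := by
        rw [List.takeWhile_cons, if_pos hns]
      have hdw : (c :: cs).dropWhile pvNoSpace = cs.dropWhile pvNoSpace := by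
        rw [List.dropWhile_cons, if_pos hns]
      rw [htw, hdw, pvGlue_cons]
      simp only [pvCat_assoc]
    | true =>
      have hcond : ¬ (PySem.Str.isIn " " c = false) := by rw [hb]; exact fun h => Bool.noConfusion h
      rw [List.foldl_cons, if_neg hcond]
      have hns : pvNoSpace c = false := by unfold pvNoSpace; rw [hb]; rfl
      have htw : (c :: cs).takeWhile pvNoSpace = [] := by
        rw [List.takeWhile_cons, if_neg (by simp [hns])]
      have hdw : (c :: cs).dropWhile pvNoSpace = c :: cs := by
        rw [List.dropWhile_cons, if_neg (by simp [hns])]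
      rw [show acc ++ [last] ++ [c] = (acc ++ [last]) ++ [c] from rfl, ih (acc ++ [last]) c,
        htw, hdw, pvGroups_cons, pvGlue_nil, pvCat_empty_right]
      simp

-- ===== VERDICT (by name: the statement is the Claim_ definition above) =====
theorem paste_oneword_spec : Claim_equal_paste_oneword := by
  intro chunks _
  unfold Spec_paste_oneword paste_oneword paste_oneword_alt
  have h0 : ([""] : List String) = [] ++ [""] := rfl
  rw [h0, pvLoopA chunks [] "", pvCat_empty_left]
  simp only [List.nil_append]
  cases htw : chunks.takeWhile pvNoSpace with
  | nil =>
    rw [htw] at *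
    simp [PySem.List.pyGetD_zero_cons, pvGlue_nil, PySem.List.slice_from_one]
  | cons c l =>
    have hne : pvGlue (c :: l) ≠ "" := pvGlue_cons_ne_empty c l
    simp [PySem.List.pyGetD_zero_cons, hne]
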